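-- pv_equiv track=rewrite | github.com/lauraharoescoi/Algoritmica_i_complexitat | PRA1/main.py | bookerineManagement_recursivoAux
-- ===== SOURCE A (Python) =====
-- def bookerineManagement_recursivoAux(reserves, llistaReserves, index=0):
--     # primer bucle recursiva plenar el MAP
--     if len(reserves) > 0:
--         reserva = reserves.pop()
--         llistaReserves.add(int(reserva[1]))
--         return bookerineManagement_recursivoAux(reserves, llistaReserves, index)
--     # segon bucle recursiu buscar la taula més propera
--     if index not in llistaReserves:
--         return index
--     return bookerineManagement_recursivoAux(reserves, llistaReserves, index + 1)
-- ===== SOURCE B (Python) =====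
-- def bookerineManagement_recursivoAux(reserves, llistaReserves, index=0):
--     # phase 1: one pass over the reservations (then empty the list, as A's pops do)
--     for reserva in reversed(reserves):
--         llistaReserves.add(int(reserva[1]))
--     reserves.clear()
--     # phase 2: sorted scan instead of repeated membership tests
--     i = index
--     for v in sorted(llistaReserves):
--         if v == i:
--             i += 1
--     return i
-- ===== Notes on version B (the rewrite author's own statement) =====
-- stated objective: alternative
-- what changed: Replaces the two recursive phases by a single fold over the reservations plus a sorted-scan that computes the first free index in one pass over sorted(set), instead of A's recursion with one membership test per candidate index.
import Mathlib
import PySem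

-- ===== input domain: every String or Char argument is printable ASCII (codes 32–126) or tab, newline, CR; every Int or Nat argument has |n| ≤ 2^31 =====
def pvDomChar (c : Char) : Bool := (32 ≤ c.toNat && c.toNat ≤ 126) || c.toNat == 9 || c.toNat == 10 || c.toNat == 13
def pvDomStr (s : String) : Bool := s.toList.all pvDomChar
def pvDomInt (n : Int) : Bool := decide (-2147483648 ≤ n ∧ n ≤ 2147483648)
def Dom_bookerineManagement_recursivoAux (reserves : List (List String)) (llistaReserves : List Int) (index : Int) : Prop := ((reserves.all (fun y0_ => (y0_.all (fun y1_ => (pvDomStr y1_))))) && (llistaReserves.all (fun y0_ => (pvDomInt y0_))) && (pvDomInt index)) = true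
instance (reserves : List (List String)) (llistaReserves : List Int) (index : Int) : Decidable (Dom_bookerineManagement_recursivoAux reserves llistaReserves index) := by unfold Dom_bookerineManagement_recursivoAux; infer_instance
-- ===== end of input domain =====

-- B replaces A's two recursive phases by a fold over the reservations plus a sorted-scan for the
-- first free index (no per-candidate membership test); equivalence is about the RETURN value only
-- (A empties `reserves` and fills `llistaReserves` in place; B performs the same mutations).

-- int(reserva[1]) — IndexError/ValueError excluded by Pre_; both Pythons perform this same step
def pvTaula (reserva : List String) : Int :=
  ((PySem.List.pyGet? reserva 1).bind PySem.Int.ofStr?).getD 0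

-- termination helper for the index-search recursion (cited by name in decreasing_by)
theorem pv_filter_le (s : List Int) (i : Int) :
    (s.filter fun x => decide (i + 1 ≤ x)).length ≤ (s.filter fun x => decide (i ≤ x)).length := by
  induction s with
  | nil => simp
  | cons a t ih =>
    simp only [List.filter_cons, decide_eq_true_eq]
    split_ifs with h1 h2 <;> first | omega | (simp only [List.length_cons]; omega)

theorem pv_filter_lt (s : List Int) (i : Int) (h : i ∈ s) :
    (s.filter fun x => decide (i + 1 ≤ x)).length < (s.filter fun x => decide (i ≤ x)).length := by
  induction s with
  | nil => simp at h
  | cons a t ih =>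
    rcases List.mem_cons.mp h with heq | hm
    · subst heq
      have hle := pv_filter_le t i
      simp only [List.filter_cons, decide_eq_true_eq]
      split_ifs with h1 h2 <;> first | omega | (simp only [List.length_cons]; omega)
    · have := ih hm
      simp only [List.filter_cons, decide_eq_true_eq]
      split_ifs with h1 h2 <;> first | omega | (simp only [List.length_cons]; omega)

-- ===== PORT A =====
def bookerineManagement_recursivoAux (reserves : List (List String)) (llistaReserves : List Int) (index : Int) : Int :=
  if h : reserves.length > 0 then
    let reserva := reserves.getLast (List.ne_nil_of_length_pos h)
    bookerineManagement_recursivoAux reserves.dropLast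
      (PySem.Set.add llistaReserves (pvTaula reserva)) index
  else if index ∉ llistaReserves then index
  else bookerineManagement_recursivoAux reserves llistaReserves (index + 1)
termination_by (reserves.length, (llistaReserves.filter fun x => decide (index ≤ x)).length)
decreasing_by
  · exact Prod.Lex.left _ _ (by simp [List.length_dropLast]; omega)
  · exact Prod.Lex.right _ (pv_filter_lt _ _ (by simpa using ‹¬ index ∉ llistaReserves›))

-- ===== PORT B =====
def bookerineManagement_recursivoAux_alt (reserves : List (List String)) (llistaReserves : List Int) (index : Int) : Int :=
  let s := reserves.reverse.foldl (fun acc reserva => PySem.Set.add acc (pvTaula reserva)) llistaReserves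
  (PySem.List.sorted s (fun x => x) false).foldl (fun i v => if v = i then i + 1 else i) index

-- ===== PRECONDITION & SPEC =====
-- excludes exactly the inputs where int(reserva[1]) raises (row shorter than 2, or a non-int string)
def Pre_bookerineManagement_recursivoAux (reserves : List (List String)) (llistaReserves : List Int) (index : Int) : Prop :=
  ∀ reserva ∈ reserves, ((PySem.List.pyGet? reserva 1).bind PySem.Int.ofStr?).isSome = true
instance (reserves : List (List String)) (llistaReserves : List Int) (index : Int) : Decidable (Pre_bookerineManagement_recursivoAux reserves llistaReserves index) := by unfold Pre_bookerineManagement_recursivoAux; infer_instance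

def pvWitness_bookerineManagement_recursivoAux : List (List String) × List Int × Int :=
  ([["a", "1"], ["b", " 3 "]], [0, 3], 0)

def Spec_bookerineManagement_recursivoAux (reserves : List (List String)) (llistaReserves : List Int) (index : Int) (out : Int) : Prop := out = bookerineManagement_recursivoAux_alt reserves llistaReserves index
instance (reserves : List (List String)) (llistaReserves : List Int) (index : Int) (out : Int) : Decidable (Spec_bookerineManagement_recursivoAux reserves llistaReserves index out) := by unfold Spec_bookerineManagement_recursivoAux; infer_instance

-- ===== CLAIM (what is proved, stated in full; the proofs are below) =====
def Claim_equal_bookerineManagement_recursivoAux : Prop := ∀ (reserves : List (List String)) (llistaReserves : List Int) (index : Int), Dom_bookerineManagement_recursivoAux reserves llistaReserves index → Pre_bookerineManagement_recursivoAux reserves llistaReserves index → Spec_bookerineManagement_recursivoAux reserves llistaReserves index (bookerineManagement_recursivoAux reserves llistaReserves index)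

-- ===== LEMMAS AND PROOFS =====

-- r is the smallest index ≥ i not occurring in s
def pvIsMex (s : List Int) (i r : Int) : Prop :=
  i ≤ r ∧ r ∉ s ∧ ∀ j, i ≤ j → j < r → j ∈ s

theorem pvIsMex_unique {s : List Int} {i r r' : Int}
    (h : pvIsMex s i r) (h' : pvIsMex s i r') : r = r' := by
  obtain ⟨hi, hn, hall⟩ := h
  obtain ⟨hi', hn', hall'⟩ := h'
  by_contra hne
  rcases lt_trichotomy r r' with hl | he | hl
  · exact hn (hall' r hi hl)
  · exact hne he
  · exact hn' (hall r' hi' hl)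

theorem pvIsMex_congr {s t : List Int} (hmem : ∀ x : Int, x ∈ s ↔ x ∈ t) {i r : Int}
    (h : pvIsMex s i r) : pvIsMex t i r := by
  obtain ⟨hi, hn, hall⟩ := h
  exact ⟨hi, fun hc => hn ((hmem r).mpr hc), fun j h1 h2 => (hmem j).mp (hall j h1 h2)⟩

-- phase 1: A on a nonempty list equals A on [] with the folded set
theorem pvA_phase1 : ∀ (reserves : List (List String)) (s : List Int) (i : Int),
    bookerineManagement_recursivoAux reserves s i =
      bookerineManagement_recursivoAux []
        (reserves.reverse.foldl (fun acc reserva => PySem.Set.add acc (pvTaula reserva)) s) i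
  | [], s, i => by simp
  | (a :: t), s, i => by
    have hne : (a :: t) ≠ ([] : List (List String)) := by simp
    rw [bookerineManagement_recursivoAux, dif_pos (show (a :: t).length > 0 by simp)]
    rw [pvA_phase1 (a :: t).dropLast]
    have hsplit : (a :: t).reverse = (a :: t).getLast hne :: (a :: t).dropLast.reverse := by
      conv_lhs => rw [← List.dropLast_append_getLast hne]
      rw [List.reverse_append]
      simp
    rw [hsplit, List.foldl_cons]
  termination_by reserves _ _ => reserves.length
  decreasing_by simp [List.length_dropLast]

-- phase 2: A on [] computes the mex from `index` upward
theorem pvA_nil_isMex : ∀ (s : List Int) (i : Int),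
    pvIsMex s i (bookerineManagement_recursivoAux [] s i)
  | s, i => by
    rw [bookerineManagement_recursivoAux]
    simp only [List.length_nil, gt_iff_lt, lt_self_iff_false, dif_neg, not_false_eq_true]
    by_cases h : i ∈ s
    · simp only [h, not_true_eq_false, if_false]
      obtain ⟨hi, hn, hall⟩ := pvA_nil_isMex s (i + 1)
      refine ⟨by omega, hn, fun j h1 h2 => ?_⟩
      rcases eq_or_lt_of_le h1 with rfl | hlt
      · exact h
      · exact hall j (by omega) h2
    · simp only [h, not_false_eq_true, if_true]
      exact ⟨le_refl i, h, fun j h1 h2 => absurd h2 (by omega)⟩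
  termination_by s i => (s.filter fun x => decide (i ≤ x)).length
  decreasing_by exact pv_filter_lt _ _ ‹i ∈ s›

-- B's sorted scan computes the mex of the scanned (nondecreasing) list
theorem pvFold_isMex : ∀ (t : List Int), t.Pairwise (· ≤ ·) → ∀ i : Int,
    pvIsMex t i (t.foldl (fun i v => if v = i then i + 1 else i) i) := by
  intro t
  induction t with
  | nil =>
    intro _ i
    simp only [List.foldl_nil]
    exact ⟨le_refl i, by simp, fun j h1 h2 => absurd h2 (by omega)⟩
  | cons v rest ih =>
    intro hp i
    have hrest := ih (List.Pairwise.of_cons hp)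
    have hhead : ∀ x ∈ rest, v ≤ x := (List.pairwise_cons.mp hp).1
    by_cases hv : v = i
    · rw [List.foldl_cons, if_pos hv]
      subst hv
      obtain ⟨hi, hn, hall⟩ := hrest (v + 1)
      refine ⟨by omega, ?_, fun j h1 h2 => ?_⟩
      · simp only [List.mem_cons, not_or]
        exact ⟨by omega, hn⟩
      · rcases eq_or_lt_of_le h1 with rfl | hlt
        · exact List.mem_cons_self
        · exact List.mem_cons_of_mem v (hall j (by omega) h2)
    · rw [List.foldl_cons, if_neg hv]
      obtain ⟨hi, hn, hall⟩ := hrest i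
      by_cases hvi : v < i
      · refine ⟨hi, ?_, fun j h1 h2 => List.mem_cons_of_mem v (hall j h1 h2)⟩
        simp only [List.mem_cons, not_or]
        exact ⟨by omega, hn⟩
      · -- i < v, so i is not in rest either and the fold returns i
        have hvgt : i < v := by omega
        have hir : i ∉ rest := fun hc => by have := hhead i hc; omega
        have hri : rest.foldl (fun i v => if v = i then i + 1 else i) i = i := by
          have : i ≤ i := le_refl i
          rcases eq_or_lt_of_le hi with he | hlt
          · exact he.symm
          · exact absurd (hall i (le_refl i) hlt) hir
        rw [hri]
        refine ⟨le_refl i, ?_, fun j h1 h2 => absurd h2 (by omega)⟩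
        simp only [List.mem_cons, not_or]
        exact ⟨by omega, hir⟩

-- ===== VERDICT (by name: the statement is the Claim_ definition above) =====
theorem bookerineManagement_recursivoAux_spec : Claim_equal_bookerineManagement_recursivoAux := by
  intro reserves llistaReserves index _ _
  unfold Spec_bookerineManagement_recursivoAux bookerineManagement_recursivoAux_alt
  rw [pvA_phase1]
  set S := reserves.reverse.foldl (fun acc reserva => PySem.Set.add acc (pvTaula reserva)) llistaReserves with hS
  have hA := pvA_nil_isMex S index
  have hB := pvFold_isMex (PySem.List.sorted S (fun x => x) false)
    (by simpa using PySem.List.sorted_pairwise S (fun x => x)) index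
  have hB' : pvIsMex S index ((PySem.List.sorted S (fun x => x) false).foldl (fun i v => if v = i then i + 1 else i) index) :=
    pvIsMex_congr (fun x => PySem.List.mem_sorted S (fun y => y) false x) hB
  exact pvIsMex_unique hA hB'
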